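-- pv_equiv track=rewrite | github.com/ibrahimferel/fried-fp-dsdba | src/cv/gradcam.py | _parse_layer_path
-- ===== SOURCE A (Python) =====
-- def _parse_layer_path(path: str) -> list[str]:
--   """Parse dotted/indexed layer path into traversal tokens."""
--   tokens: list[str] = []
--   i = 0
--   while i < len(path):
--     if path[i] == ".":
--       i += 1
--       continue
--     if path[i] == "[":
--       j = path.index("]", i)
--       tokens.append(path[i + 1 : j])
--       i = j + 1
--       continue
--     j = i
--     while j < len(path) and path[j] not in ".[":
--       j += 1
--     tokens.append(path[i:j])
--     i = j
--   return tokens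
-- ===== SOURCE B (Python) =====
-- def _parse_layer_path(path: str) -> list[str]:
--   """Parse dotted/indexed layer path into traversal tokens."""
--   tokens: list[str] = []
--   rest = path
--   while rest:
--     head, sep, rest = rest.partition("[")
--     tokens.extend(t for t in head.split(".") if t)
--     if sep:
--       inner, _, rest = rest.partition("]")
--       tokens.append(inner)
--   return tokens
-- ===== Notes on version B (the rewrite author's own statement) =====
-- stated objective: idiomatic
-- what changed: Replaces the manual index-based character scanner (while loop with explicit i/j cursors and path.index) with chunk-wise consumption using str.partition('[')/partition(']') and str.split('.'), so no per-character index arithmetic remains.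
import Mathlib
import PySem

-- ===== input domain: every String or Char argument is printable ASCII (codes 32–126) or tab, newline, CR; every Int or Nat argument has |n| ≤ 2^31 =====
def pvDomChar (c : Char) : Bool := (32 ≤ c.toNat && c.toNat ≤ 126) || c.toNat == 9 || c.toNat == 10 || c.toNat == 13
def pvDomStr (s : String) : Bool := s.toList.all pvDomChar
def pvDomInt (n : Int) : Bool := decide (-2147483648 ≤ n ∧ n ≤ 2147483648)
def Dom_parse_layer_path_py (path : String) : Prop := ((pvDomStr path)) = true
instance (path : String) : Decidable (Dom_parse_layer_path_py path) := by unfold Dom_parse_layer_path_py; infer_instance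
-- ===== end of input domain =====

-- B replaces A's index-cursor scanner with chunk-wise partition/split consumption (idiomatic,
-- same O(n) cost); on an unterminated '[' A raises ValueError while B returns the scanned tokens.
-- Both ports build tokens as List Char and convert to String once at the wrapper.

-- ===== PORT A =====
-- inner while loop 'while j < len(path) and path[j] not in ".["': (path[i:j], remaining suffix)
def pvScanName : List Char → List Char × List Char
  | [] => ([], [])
  | c :: rest =>
    if c = '.' ∨ c = '[' then ([], c :: rest)
    else
      let p := pvScanName rest
      (c :: p.1, p.2)

-- path.index("]", i): chars strictly before the first ']' and the suffix after it; none = ValueError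
def pvFindRBracket : List Char → Option (List Char × List Char)
  | [] => none
  | c :: rest =>
    if c = ']' then some ([], rest)
    else (pvFindRBracket rest).map (fun p => (c :: p.1, p.2))

theorem pvScanName_len (l : List Char) : (pvScanName l).2.length ≤ l.length := by
  induction l with
  | nil => simp [pvScanName]
  | cons c rest ih =>
    simp only [pvScanName]
    split
    · simp
    · simpa using Nat.le_succ_of_le ih

theorem pvFindRBracket_len (l : List Char) (t r : List Char)
    (h : pvFindRBracket l = some (t, r)) : r.length < l.length := by
  induction l generalizing t r with
  | nil => simp [pvFindRBracket] at h
  | cons c rest ih =>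
    simp only [pvFindRBracket] at h
    split at h
    · simp only [Option.some.injEq, Prod.mk.injEq] at h
      simp [← h.2]
    · match hr : pvFindRBracket rest with
      | none => simp [hr] at h
      | some (t', r') =>
        simp only [hr, Option.map_some, Option.some.injEq, Prod.mk.injEq] at h
        exact Nat.lt_succ_of_lt (h.2 ▸ ih t' r' hr)

-- the outer while loop of A, run on the suffix of path starting at cursor i
def pvGoA : List Char → List (List Char)
  | [] => []
  | c :: rest =>
    if c = '.' then pvGoA rest
    else if c = '[' then
      match hf : pvFindRBracket rest with
      | none => []            -- Python raises ValueError here (excluded by Pre_)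
      | some (t, r) => t :: pvGoA r
    else
      let p := pvScanName (c :: rest)
      p.1 :: pvGoA p.2
  termination_by l => l.length
  decreasing_by
  · simp
  · exact Nat.lt_succ_of_lt (pvFindRBracket_len rest t r hf)
  · rename_i hc1 hc2
    simp only [pvScanName, if_neg (by tauto : ¬ (c = '.' ∨ c = '['))]
    exact Nat.lt_succ_of_le (pvScanName_len rest)

def parse_layer_path_py (path : String) : List String :=
  (pvGoA path.toList).map String.ofList

-- ===== PORT B =====
-- s.partition(sep) for a one-char sep: (before, sep found?, after)
def pvPartition (sep : Char) : List Char → List Char × Bool × List Char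
  | [] => ([], false, [])
  | c :: rest =>
    if c = sep then ([], true, rest)
    else
      let p := pvPartition sep rest
      (c :: p.1, p.2.1, p.2.2)

-- head.split("."): exact hand port of str.split for the single-char separator '.'
def pvSplitDots : List Char → List (List Char)
  | [] => [[]]
  | c :: rest =>
    let ps := pvSplitDots rest
    if c = '.' then [] :: ps
    else (c :: ps.headI) :: ps.tail

theorem pvPartition_len (sep : Char) (l : List Char) :
    (pvPartition sep l).2.2.length ≤ l.length := by
  induction l with
  | nil => simp [pvPartition]
  | cons c rest ih =>
    simp only [pvPartition]
    split
    · simp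
    · simpa using Nat.le_succ_of_le ih

theorem pvPartition_len_of_found (sep : Char) (l : List Char)
    (h : (pvPartition sep l).2.1 = true) : (pvPartition sep l).2.2.length < l.length := by
  induction l with
  | nil => simp [pvPartition] at h
  | cons c rest ih =>
    by_cases hc : c = sep
    · simp [pvPartition, hc]
    · simp only [pvPartition, if_neg hc] at h ⊢
      exact Nat.lt_succ_of_lt (ih h)

-- the while loop of B: consume up to the next '[', emit the dotted names, then the bracket inside
def pvGoB : List Char → List (List Char)
  | [] => []
  | c :: rest =>
    let q := pvPartition '[' (c :: rest)
    let toks := (pvSplitDots q.1).filter (fun t => t ≠ [])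
    if hf : q.2.1 = true then
      let q2 := pvPartition ']' q.2.2
      toks ++ q2.1 :: pvGoB q2.2.2
    else toks
  termination_by l => l.length
  decreasing_by
    exact Nat.lt_of_le_of_lt (pvPartition_len ']' _)
      (pvPartition_len_of_found '[' (c :: rest) hf)

def parse_layer_path_py_alt (path : String) : List String :=
  (pvGoB path.toList).map String.ofList

-- ===== PRECONDITION & SPEC =====
-- every '[' in the path must have a ']' somewhere after it
def pvBracketsClosed : List Char → Bool
  | [] => true
  | c :: rest => (c ≠ '[' || rest.contains ']') && pvBracketsClosed rest

-- Pre_ excludes exactly the inputs on which A raises ValueError: paths containing a '['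
-- with no ']' anywhere after it.
def Pre_parse_layer_path_py (path : String) : Prop :=
  pvBracketsClosed path.toList = true
instance (path : String) : Decidable (Pre_parse_layer_path_py path) := by
  unfold Pre_parse_layer_path_py; infer_instance
def pvWitness_parse_layer_path_py : String := "layers[0].attn.qkv"

def Spec_parse_layer_path_py (path : String) (out : List String) : Prop :=
  out = parse_layer_path_py_alt path
instance (path : String) (out : List String) : Decidable (Spec_parse_layer_path_py path out) := by
  unfold Spec_parse_layer_path_py; infer_instance

-- ===== CLAIM (what is proved, stated in full; the proofs are below) =====
def Claim_equal_parse_layer_path_py : Prop :=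
  ∀ (path : String), Dom_parse_layer_path_py path → Pre_parse_layer_path_py path →
    Spec_parse_layer_path_py path (parse_layer_path_py path)

-- ===== LEMMAS AND PROOFS =====

theorem pvBracketsClosed_cons (c : Char) (rest : List Char)
    (h : pvBracketsClosed (c :: rest) = true) :
    (c = '[' → rest.contains ']' = true) ∧ pvBracketsClosed rest = true := by
  simp only [pvBracketsClosed, Bool.and_eq_true, Bool.or_eq_true] at h
  refine ⟨fun hc => ?_, h.2⟩
  rcases h.1 with h1 | h1
  · simp [hc] at h1
  · exact h1

theorem pvBracketsClosed_append (a b : List Char)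
    (h : pvBracketsClosed (a ++ b) = true) : pvBracketsClosed b = true := by
  induction a with
  | nil => simpa using h
  | cons c t ih => exact ih (pvBracketsClosed_cons c (t ++ b) h).2

theorem pvScanName_suffix (l : List Char) : ∃ a, l = a ++ (pvScanName l).2 := by
  induction l with
  | nil => exact ⟨[], rfl⟩
  | cons c rest ih =>
    simp only [pvScanName]
    split
    · exact ⟨[], rfl⟩
    · obtain ⟨a, ha⟩ := ih
      exact ⟨c :: a, by simpa using ha⟩

theorem pvFindRBracket_suffix (l t r : List Char)
    (h : pvFindRBracket l = some (t, r)) : ∃ a, l = a ++ r := by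
  induction l generalizing t r with
  | nil => simp [pvFindRBracket] at h
  | cons c rest ih =>
    simp only [pvFindRBracket] at h
    split at h
    · simp only [Option.some.injEq, Prod.mk.injEq] at h
      exact ⟨[c], by simp [h.2]⟩
    · match hr : pvFindRBracket rest with
      | none => simp [hr] at h
      | some (t', r') =>
        simp only [hr, Option.map_some, Option.some.injEq, Prod.mk.injEq] at h
        obtain ⟨a, ha⟩ := ih t' r' hr
        exact ⟨c :: a, by simp [ha, h.2]⟩

theorem pvFindRBracket_of_contains (l : List Char) (h : l.contains ']' = true) :
    ∃ t r, pvFindRBracket l = some (t, r) := by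
  induction l with
  | nil => simp at h
  | cons c rest ih =>
    by_cases hc : c = ']'
    · exact ⟨[], rest, by simp [pvFindRBracket, hc]⟩
    · have hmem : ']' ∈ c :: rest := by simpa using h
      have hm : ']' ∈ rest := by
        rcases List.mem_cons.mp hmem with h1 | h1
        · exact absurd h1.symm hc
        · exact h1
      obtain ⟨t, r, hr⟩ := ih (by simpa using hm)
      exact ⟨c :: t, r, by simp [pvFindRBracket, hc, hr]⟩

-- the pieces of rest.partition("]") agree with A's index-based search for ']'
theorem pvFindRBracket_eq_partition (l t r : List Char)
    (h : pvFindRBracket l = some (t, r)) : pvPartition ']' l = (t, true, r) := by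
  induction l generalizing t r with
  | nil => simp [pvFindRBracket] at h
  | cons c rest ih =>
    simp only [pvFindRBracket] at h
    by_cases hc : c = ']'
    · simp only [if_pos hc, Option.some.injEq, Prod.mk.injEq] at h
      simp [pvPartition, hc, ← h.1, ← h.2]
    · simp only [if_neg hc] at h
      match hr : pvFindRBracket rest with
      | none => simp [hr] at h
      | some (t', r') =>
        simp only [hr, Option.map_some, Option.some.injEq, Prod.mk.injEq] at h
        simp [pvPartition, hc, ih t' r' hr, ← h.1, ← h.2]

theorem pvSplitDots_ne_nil (l : List Char) : pvSplitDots l ≠ [] := by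
  cases l with
  | nil => simp [pvSplitDots]
  | cons c rest =>
    simp only [pvSplitDots]
    split <;> simp

-- unguarded body of B's loop; pvGoB equals it even on []
def pvGoBBody (l : List Char) : List (List Char) :=
  let q := pvPartition '[' l
  let toks := (pvSplitDots q.1).filter (fun t => t ≠ [])
  if q.2.1 = true then
    let q2 := pvPartition ']' q.2.2
    toks ++ q2.1 :: pvGoB q2.2.2
  else toks

theorem pvGoB_eq_body (l : List Char) : pvGoB l = pvGoBBody l := by
  cases l with
  | nil => simp [pvGoB, pvGoBBody, pvPartition, pvSplitDots]
  | cons c rest =>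
    rw [pvGoB, pvGoBBody]
    split <;> rfl

theorem pvGoB_dot (rest : List Char) : pvGoB ('.' :: rest) = pvGoB rest := by
  rw [pvGoB_eq_body, pvGoB_eq_body rest]
  simp [pvGoBBody, pvPartition, pvSplitDots, if_neg (by decide : ¬ ('.' = '['))]

theorem pvGoB_lbracket (rest : List Char) :
    pvGoB ('[' :: rest) =
      (pvPartition ']' rest).1 :: pvGoB (pvPartition ']' rest).2.2 := by
  rw [pvGoB_eq_body]
  simp [pvGoBBody, pvPartition, pvSplitDots]

theorem pvGoB_name (c : Char) (rest : List Char) (hc1 : ¬ c = '.') (hc2 : ¬ c = '[') :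
    pvGoB (c :: rest) =
      (c :: (pvScanName rest).1) :: pvGoB (pvScanName rest).2 := by
  induction rest generalizing c with
  | nil =>
    rw [pvGoB_eq_body]
    simp [pvGoBBody, pvPartition, pvSplitDots, pvScanName, hc1, hc2, pvGoB]
  | cons d rs ih =>
    by_cases hd1 : d = '.'
    · subst hd1
      rw [pvGoB_eq_body, pvScanName, if_pos (Or.inl rfl)]
      rw [show pvGoB ('.' :: rs) = pvGoB rs from pvGoB_dot rs, pvGoB_eq_body rs]
      simp [pvGoBBody, pvPartition, pvSplitDots, hc1, hc2]
      split <;> rfl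
    · by_cases hd2 : d = '['
      · subst hd2
        rw [pvGoB_eq_body, pvScanName, if_pos (Or.inr rfl), pvGoB_lbracket]
        simp [pvGoBBody, pvPartition, pvSplitDots, hc1, hc2]
      · have ihd := ih d hd1 hd2
        rw [pvGoB_eq_body] at ihd ⊢
        rw [pvScanName, if_neg (by tauto : ¬ (d = '.' ∨ d = '['))]
        cases hs : pvSplitDots (pvPartition '[' rs).1 with
        | nil => exact absurd hs (pvSplitDots_ne_nil _)
        | cons p ps =>
          simp only [pvGoBBody, pvPartition, if_neg hc2, if_neg hd2, pvSplitDots,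
            if_neg hc1, if_neg hd1, hs, List.headI_cons, List.tail_cons] at ihd ⊢
          cases hf : (pvPartition '[' rs).2.1 <;>
            simp only [hf, if_true, if_false, Bool.false_eq_true] at ihd ⊢ <;>
            simp_all

theorem pvGoA_eq_pvGoB : ∀ (n : Nat) (l : List Char), l.length ≤ n →
    pvBracketsClosed l = true → pvGoA l = pvGoB l := by
  intro n
  induction n with
  | zero =>
    intro l hl _
    have : l = [] := List.eq_nil_of_length_eq_zero (Nat.le_zero.mp hl)
    subst this
    simp [pvGoA, pvGoB]
  | succ n ih =>
    intro l hl hcl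
    cases l with
    | nil => simp [pvGoA, pvGoB]
    | cons c rest =>
      obtain ⟨hbr, hrest⟩ := pvBracketsClosed_cons c rest hcl
      by_cases hc1 : c = '.'
      · subst hc1
        rw [pvGoA, if_pos rfl, pvGoB_dot]
        exact ih rest (by simpa using hl) hrest
      · by_cases hc2 : c = '['
        · subst hc2
          obtain ⟨t, r, hfr⟩ := pvFindRBracket_of_contains rest (hbr rfl)
          rw [pvGoA, if_neg hc1, if_pos rfl]
          rw [pvGoB_lbracket, pvFindRBracket_eq_partition rest t r hfr]
          obtain ⟨a, ha⟩ := pvFindRBracket_suffix rest t r hfr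
          have hr : pvBracketsClosed r = true := pvBracketsClosed_append a r (ha ▸ hrest)
          have hlen : r.length ≤ n := by
            have := pvFindRBracket_len rest t r hfr
            simp only [List.length_cons] at hl
            omega
          split
          · rename_i heq
            rw [heq] at hfr
            exact absurd hfr (by simp)
          · rename_i t' r' heq
            rw [heq] at hfr
            simp only [Option.some.injEq, Prod.mk.injEq] at hfr
            rw [hfr.1, hfr.2, ih r hlen hr]
        · rw [pvGoA, if_neg hc1, if_neg hc2, pvGoB_name c rest hc1 hc2]
          simp only [pvScanName, if_neg (by tauto : ¬ (c = '.' ∨ c = '['))]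
          obtain ⟨a, ha⟩ := pvScanName_suffix rest
          have hr : pvBracketsClosed (pvScanName rest).2 = true :=
            pvBracketsClosed_append a _ (ha ▸ hrest)
          have hlen : (pvScanName rest).2.length ≤ n := by
            have := pvScanName_len rest
            simp only [List.length_cons] at hl
            omega
          rw [ih _ hlen hr]

-- ===== VERDICT (by name: the statement is the Claim_ definition above) =====
theorem parse_layer_path_py_spec : Claim_equal_parse_layer_path_py := by
  intro path _ hpre
  unfold Spec_parse_layer_path_py parse_layer_path_py parse_layer_path_py_alt
  rw [pvGoA_eq_pvGoB path.toList.length path.toList le_rfl hpre]
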